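-- pv_equiv track=rewrite | github.com/C3BI-pasteur-fr/taxo_pack | src/writeHSPsubject.py | cons_max_pos
-- ===== SOURCE A (Python) =====
-- def cons_max_pos(l):
--     maxi = 0
--     vu = ['.']
--     value = '.'
--     for e in l:
--         if e in vu:
--             pass
--         else:
--             vu.append(e)
--             ctp = l.count(e)
--             if maxi < ctp:
--                 maxi = ctp
--                 value = e
--     return value
-- ===== SOURCE B (Python) =====
-- def cons_max_pos(l):
--     # Sort the non-'.' elements so equal values are contiguous, measure run
--     # lengths in one scan to collect all values of maximal multiplicity, then
--     # return the candidate that appears earliest in the original list.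
--     xs = sorted(e for e in l if e != '.')
--     best = 0
--     cands = []
--     i = 0
--     n = len(xs)
--     while i < n:
--         j = i + 1
--         while j < n and xs[j] == xs[i]:
--             j += 1
--         run = j - i
--         if run > best:
--             best = run
--             cands = [xs[i]]
--         elif run == best:
--             cands.append(xs[i])
--         i = j
--     for e in l:
--         if e in cands:
--             return e
--     return '.'
-- ===== Notes on version B (the rewrite author's own statement) =====
-- stated objective: faster
-- what changed: Replaces A's dedup-and-recount scan (l.count re-scan for every new element, strict-improvement accumulator) by a sort-based algorithm: sort the non-'.' elements, read multiplicities off as run lengths of the sorted list collecting all maximal-run values, then a final scan returns the candidate appearing earliest in the original list (A's tie-break).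
import Mathlib
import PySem

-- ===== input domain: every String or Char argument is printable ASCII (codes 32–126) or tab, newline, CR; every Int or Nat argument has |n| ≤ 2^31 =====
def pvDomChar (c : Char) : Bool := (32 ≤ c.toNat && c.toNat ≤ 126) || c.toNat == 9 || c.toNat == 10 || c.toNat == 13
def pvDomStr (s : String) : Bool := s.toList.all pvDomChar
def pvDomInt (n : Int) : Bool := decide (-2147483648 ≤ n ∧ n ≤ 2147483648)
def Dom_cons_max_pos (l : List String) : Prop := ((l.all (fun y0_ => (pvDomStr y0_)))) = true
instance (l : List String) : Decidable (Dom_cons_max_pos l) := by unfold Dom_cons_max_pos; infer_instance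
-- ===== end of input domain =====

-- B replaces A's dedup-and-recount scan by a sort-based algorithm: sort the non-'.'
-- elements, read multiplicities off as run lengths of the sorted list collecting all
-- maximal-run values, then return the candidate appearing earliest in the original list
-- (objective: faster; a timing run measured B faster).

-- ===== PORT A =====
def cons_max_pos (l : List String) : String :=
  (l.foldl (fun (st : Int × List String × String) e =>
      if e ∈ st.2.1 then st
      else
        let vu' := st.2.1 ++ [e]
        let ctp : Int := (PySem.List.count l e : Int)
        if st.1 < ctp then (ctp, vu', e) else (st.1, vu', st.2.2))
    (0, ["."], ".")).2.2

-- ===== PORT B =====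
-- inner while loop: length of the run of x at the head of the remaining list, plus the rest
def pvRun (x : String) : List String → Nat × List String
  | [] => (0, [])
  | y :: t => if y = x then ((pvRun x t).1 + 1, (pvRun x t).2) else (0, y :: t)

theorem pvRun_len (x : String) : ∀ t : List String, (pvRun x t).2.length ≤ t.length := by
  intro t
  induction t with
  | nil => simp [pvRun]
  | cons y t ih => by_cases h : y = x <;> simp [pvRun, h] <;> omega

-- outer while loop: scan the sorted list run by run, keeping the best run length and
-- the values achieving it
def pvScan : List String → Nat → List String → Nat × List String
  | [], best, cands => (best, cands)
  | x :: t, best, cands =>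
    let run := (pvRun x t).1 + 1
    if run > best then pvScan (pvRun x t).2 run [x]
    else if run = best then pvScan (pvRun x t).2 best (cands ++ [x])
    else pvScan (pvRun x t).2 best cands
termination_by xs _ _ => xs.length
decreasing_by all_goals (have := pvRun_len x t; simp; omega)

-- final loop: first element of l that is a candidate, else '.'
def pvFirst : List String → List String → String
  | [], _ => "."
  | e :: t, cands => if e ∈ cands then e else pvFirst t cands

def cons_max_pos_alt (l : List String) : String :=
  let xs := PySem.List.sorted (l.filter (fun e => decide (e ≠ "."))) (fun x => x) false
  pvFirst l (pvScan xs 0 []).2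

-- ===== PRECONDITION & SPEC =====
def Spec_cons_max_pos (l : List String) (out : String) : Prop := out = cons_max_pos_alt l
instance (l : List String) (out : String) : Decidable (Spec_cons_max_pos l out) := by unfold Spec_cons_max_pos; infer_instance

-- ===== CLAIM (what is proved, stated in full; the proofs are below) =====
def Claim_equal_cons_max_pos : Prop := ∀ (l : List String), Dom_cons_max_pos l → Spec_cons_max_pos l (cons_max_pos l)

-- ===== LEMMAS AND PROOFS =====

-- the distinct elements of xs, in first-appearance order, that are not already in vu
def pvSel (vu xs : List String) : List String :=
  (PySem.Set.ofList xs).filter (fun y => decide (y ∉ vu))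

theorem pvSel_cons (vu : List String) (e : String) (t : List String) :
    pvSel vu (e :: t) = if e ∈ vu then pvSel vu t else e :: pvSel (vu ++ [e]) t := by
  have h1 : (e :: t) = [e] ++ t := rfl
  unfold pvSel
  rw [h1, PySem.Set.ofList_append, PySem.Set.update_eq_append_filter]
  rw [List.filter_append, List.filter_filter]
  have hof : PySem.Set.ofList [e] = [e] := rfl
  rw [hof]
  by_cases he : e ∈ vu
  · simp [he]
    apply List.filter_congr
    intro y hy
    simp
    intro h2
    exact fun h3 => absurd (h3 ▸ he) h2
  · simp [he]

theorem mem_pvSel (vu xs : List String) (k : String) :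
    k ∈ pvSel vu xs ↔ k ∈ xs ∧ k ∉ vu := by
  simp [pvSel, PySem.Set.mem_ofList]

-- A's fold, with the seen-list abstracted into pvSel
theorem foldA (l : List String) : ∀ (rest vu : List String) (m : Int) (v : String),
    (rest.foldl (fun (st : Int × List String × String) e =>
      if e ∈ st.2.1 then st
      else
        let vu' := st.2.1 ++ [e]
        let ctp : Int := (PySem.List.count l e : Int)
        if st.1 < ctp then (ctp, vu', e) else (st.1, vu', st.2.2)) (m, vu, v)).2.2
    = ((pvSel vu rest).foldl (fun (p : Int × String) k =>
        if p.1 < (PySem.List.count l k : Int) then ((PySem.List.count l k : Int), k) else p) (m, v)).2 := by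
  intro rest
  induction rest with
  | nil => intro vu m v; rfl
  | cons e t ih =>
    intro vu m v
    rw [List.foldl_cons, pvSel_cons]
    by_cases he : e ∈ vu
    · simp only [he, if_pos]
      exact ih vu m v
    · simp only [he, if_false]
      by_cases hc : m < (PySem.List.count l e : Int)
      · simp only [hc, if_pos, List.foldl_cons]
        exact ih (vu ++ [e]) _ _
      · simp only [hc, List.foldl_cons, ite_false]
        exact ih (vu ++ [e]) _ _

-- running maximum of the costs of ks, starting from m
def runMax (c : String → Int) (ks : List String) (m : Int) : Int :=
  ks.foldl (fun a k => max a (c k)) m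

theorem runMax_base_le (c : String → Int) : ∀ (ks : List String) (m : Int), m ≤ runMax c ks m := by
  intro ks
  induction ks with
  | nil => intro m; simp [runMax]
  | cons k t ih =>
    intro m
    have h1 : m ≤ max m (c k) := le_max_left _ _
    exact le_trans h1 (ih (max m (c k)))

theorem runMax_mem_le (c : String → Int) : ∀ (ks : List String) (m : Int) (k : String),
    k ∈ ks → c k ≤ runMax c ks m := by
  intro ks
  induction ks with
  | nil => intro m k h; simp at h
  | cons k0 t ih =>
    intro m k h
    rcases List.mem_cons.mp h with h | h
    · subst h
      exact le_trans (le_max_right m (c k)) (runMax_base_le c t _)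
    · exact ih _ k h

theorem runMax_cases (c : String → Int) : ∀ (ks : List String) (m : Int),
    runMax c ks m = m ∨ ∃ k ∈ ks, c k = runMax c ks m := by
  intro ks
  induction ks with
  | nil => intro m; left; rfl
  | cons k t ih =>
    intro m
    have hr : runMax c (k :: t) m = runMax c t (max m (c k)) := rfl
    rcases ih (max m (c k)) with h | ⟨k', hk', hck'⟩
    · by_cases hk : c k ≤ m
      · left; rw [hr, h]; omega
      · right; exact ⟨k, List.mem_cons_self, by rw [hr, h]; omega⟩
    · right; exact ⟨k', List.mem_cons_of_mem _ hk', by rw [hr, ← hck']⟩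

-- characterisation of A's strict-improvement fold: it computes the running max
-- and the first element achieving it (if the max improved on the seed)
theorem foldMax_char (c : String → Int) : ∀ (ks : List String) (m : Int) (v : String),
    (ks.foldl (fun (p : Int × String) k => if p.1 < c k then (c k, k) else p) (m, v))
    = (runMax c ks m,
       if runMax c ks m = m then v
       else (ks.find? (fun k => decide (c k = runMax c ks m))).getD v) := by
  intro ks
  induction ks with
  | nil => intro m v; simp [runMax]
  | cons k t ih =>
    intro m v
    have hr : runMax c (k :: t) m = runMax c t (max m (c k)) := rfl
    rw [List.foldl_cons]
    by_cases hm : m < c k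
    · have hmax : max m (c k) = c k := by omega
      simp only [hm, if_pos]
      rw [ih (c k) k]
      have hRge : c k ≤ runMax c t (c k) := runMax_base_le c t (c k)
      have hRne : ¬ (runMax c t (c k) = m) := by omega
      rw [hr, hmax]
      rw [if_neg hRne]
      by_cases hEq : runMax c t (c k) = c k
      · have hpk : (fun k' => decide (c k' = runMax c t (c k))) k = true := by
          simp [hEq]
        rw [List.find?_cons_of_pos (p := fun k' => decide (c k' = runMax c t (c k))) hpk]
        simp [hEq]
      · have hpk : ¬ ((fun k' => decide (c k' = runMax c t (c k))) k = true) := by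
          simp
          omega
        rw [List.find?_cons_of_neg (p := fun k' => decide (c k' = runMax c t (c k))) hpk]
        simp only [hEq, if_false]
        -- the find? over t succeeds, so getD k = getD v
        rcases runMax_cases c t (c k) with h | ⟨k', hk', hck'⟩
        · exact absurd h hEq
        · have hsome : (t.find? (fun k' => decide (c k' = runMax c t (c k)))).isSome := by
            rw [List.find?_isSome]
            exact ⟨k', hk', by simp [hck']⟩
          rcases Option.isSome_iff_exists.mp hsome with ⟨a, ha⟩
          rw [ha]
          rfl
    · have hmax : max m (c k) = m := by omega
      simp only [hm, if_false]
      rw [ih m v, hr, hmax]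
      by_cases hEq : runMax c t m = m
      · simp [hEq]
      · have hmlt : m < runMax c t m := by
          have := runMax_base_le c t m
          omega
        have hpk : ¬ ((fun k' => decide (c k' = runMax c t m)) k = true) := by
          simp
          omega
        rw [List.find?_cons_of_neg (p := fun k' => decide (c k' = runMax c t m)) hpk]

-- find? lemmas -------------------------------------------------------------

theorem find?_pred_congr {α : Type} (p q : α → Bool) : ∀ (l : List α),
    (∀ x ∈ l, p x = q x) → l.find? p = l.find? q := by
  intro l
  induction l with
  | nil => intro _; rfl
  | cons x t ih =>
    intro h
    have hx := h x List.mem_cons_self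
    by_cases hp : p x = true
    · rw [List.find?_cons_of_pos hp, List.find?_cons_of_pos (hx ▸ hp)]
    · have hp' : p x = false := by revert hp; cases p x <;> simp
      rw [List.find?_cons_of_neg (by simp [hp']), List.find?_cons_of_neg (by simp [← hx, hp'])]
      exact ih (fun y hy => h y (List.mem_cons_of_mem _ hy))

theorem find?_filter' {α : Type} (f p : α → Bool) : ∀ (l : List α),
    (l.filter f).find? p = l.find? (fun x => f x && p x) := by
  intro l
  induction l with
  | nil => rfl
  | cons x t ih =>
    by_cases hf : f x = true
    · rw [List.filter_cons_of_pos hf]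
      by_cases hp : p x = true
      · rw [List.find?_cons_of_pos hp, List.find?_cons_of_pos (by simp [hf, hp])]
      · have hp' : p x = false := by revert hp; cases p x <;> simp
        rw [List.find?_cons_of_neg (by simp [hp']), List.find?_cons_of_neg (by simp [hp'])]
        exact ih
    · have hf' : f x = false := by revert hf; cases f x <;> simp
      rw [List.filter_cons_of_neg (by simp [hf']), List.find?_cons_of_neg (by simp [hf'])]
      exact ih

theorem find?_ofList (p : String → Bool) : ∀ (l : List String),
    (PySem.Set.ofList l).find? p = l.find? p := by
  intro l
  induction l with
  | nil => rfl
  | cons x t ih =>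
    rw [PySem.Set.ofList_cons]
    by_cases hp : p x = true
    · rw [List.find?_cons_of_pos hp, List.find?_cons_of_pos hp]
    · have hp' : p x = false := by revert hp; cases p x <;> simp
      rw [List.find?_cons_of_neg (by simp [hp']), List.find?_cons_of_neg (by simp [hp'])]
      have hdis : PySem.Set.discard (PySem.Set.ofList t) x
          = (PySem.Set.ofList t).filter (fun y => !(y == x)) := rfl
      rw [hdis, find?_filter']
      rw [find?_pred_congr _ p _ (fun y _ => by
        by_cases hyx : y = x
        · subst hyx; simp [hp']
        · simp [hyx])]
      exact ih

theorem find?_pvSel (vu l : List String) (p : String → Bool) :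
    (pvSel vu l).find? p = l.find? (fun y => decide (y ∉ vu) && p y) := by
  unfold pvSel
  rw [find?_filter', find?_ofList]

-- pvRun lemmas -------------------------------------------------------------

theorem pvRun_decomp (x : String) : ∀ (t : List String),
    t = List.replicate (pvRun x t).1 x ++ (pvRun x t).2 := by
  intro t
  induction t with
  | nil => rfl
  | cons y t ih =>
    by_cases h : y = x
    · subst h
      have h1 : (pvRun y (y :: t)).1 = (pvRun y t).1 + 1 := by simp [pvRun]
      have h2 : (pvRun y (y :: t)).2 = (pvRun y t).2 := by simp [pvRun]
      rw [h1, h2, List.replicate_succ, List.cons_append]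
      exact congrArg (List.cons y) ih
    · simp [pvRun, h]

theorem pvRun_not_mem (x : String) : ∀ (t : List String),
    (x :: t).Pairwise (· ≤ ·) → x ∉ (pvRun x t).2 := by
  intro t
  induction t with
  | nil => intro _; simp [pvRun]
  | cons y t ih =>
    intro hp
    by_cases h : y = x
    · subst h
      have h2 : (pvRun y (y :: t)).2 = (pvRun y t).2 := by simp [pvRun]
      rw [h2]
      exact ih (hp.sublist ((List.sublist_cons_self y t).cons₂ y))
    · have h2 : (pvRun x (y :: t)).2 = y :: t := by simp [pvRun, h]
      rw [h2]
      intro hx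
      rcases List.mem_cons.mp hx with h1 | h1
      · exact h h1.symm
      · rw [List.pairwise_cons] at hp
        have hxy : x ≤ y := hp.1 y List.mem_cons_self
        have hyx : y ≤ x := (List.pairwise_cons.mp hp.2).1 x h1
        exact h (le_antisymm hyx hxy)

-- specification of the run-length scan over a sorted list:
-- the first component is the max of the seed and all multiplicities, the second
-- collects exactly the values of maximal multiplicity (plus the incoming candidates
-- if the seed was never beaten)
theorem pvScan_spec : ∀ (n : Nat) (xs : List String), xs.length ≤ n →
    xs.Pairwise (· ≤ ·) → ∀ (b : Nat) (c : List String),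
    (b ≤ (pvScan xs b c).1)
  ∧ (∀ y ∈ xs, xs.count y ≤ (pvScan xs b c).1)
  ∧ ((pvScan xs b c).1 = b ∨ ∃ y ∈ xs, xs.count y = (pvScan xs b c).1)
  ∧ (∀ y, y ∈ (pvScan xs b c).2 ↔
      ((pvScan xs b c).1 = b ∧ y ∈ c) ∨ (y ∈ xs ∧ xs.count y = (pvScan xs b c).1)) := by
  intro n
  induction n with
  | zero =>
    intro xs hlen _ b c
    have hnil : xs = [] := by
      cases xs with
      | nil => rfl
      | cons a t => simp at hlen
    subst hnil
    simp [pvScan]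
  | succ n ih =>
    intro xs hlen hsort b c
    match xs with
    | [] => simp [pvScan]
    | x :: t =>
      -- facts about the head run
      have hdec := pvRun_decomp x t
      have hnx : x ∉ (pvRun x t).2 := pvRun_not_mem x t hsort
      set k := (pvRun x t).1 with hk
      set r := (pvRun x t).2 with hrr
      have hrsub : r.Sublist t := (List.IsSuffix.sublist ⟨List.replicate k x, hdec.symm⟩)
      have hrsort : r.Pairwise (· ≤ ·) := (List.pairwise_cons.mp hsort).2.sublist hrsub
      have hrlen : r.length ≤ n := by
        have h1 : r.length ≤ t.length := hrsub.length_le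
        simp at hlen
        omega
      -- multiplicities
      have hcx : (x :: t).count x = k + 1 := by
        have hz : r.count x = 0 := List.count_eq_zero_of_not_mem hnx
        have ht : t.count x = k := by
          conv_lhs => rw [hdec]
          rw [List.count_append, List.count_replicate_self, hz]
          omega
        rw [List.count_cons_self, ht]
      have hcy : ∀ y, y ≠ x → (x :: t).count y = r.count y := by
        intro y hy
        have hz : (List.replicate k x).count y = 0 :=
          List.count_eq_zero_of_not_mem (by simp [List.mem_replicate, hy])
        rw [List.count_cons_of_ne (Ne.symm hy)]
        conv_lhs => rw [hdec]
        rw [List.count_append, hz]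
        omega
      have hmem : ∀ y, y ∈ (x :: t) ↔ y = x ∨ y ∈ r := by
        intro y
        constructor
        · intro hy
          rcases List.mem_cons.mp hy with h | h
          · exact Or.inl h
          · rw [hdec] at h
            rcases List.mem_append.mp h with h | h
            · exact Or.inl (List.eq_of_mem_replicate h)
            · exact Or.inr h
        · intro hy
          rcases hy with h | h
          · exact h ▸ List.mem_cons_self
          · exact List.mem_cons_of_mem _ (hrsub.mem h)
      -- unfold one step of the scan
      by_cases h1 : k + 1 > b
      · have hstep : pvScan (x :: t) b c = pvScan r (k + 1) [x] := by
          simp only [pvScan, ← hk, ← hrr]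
          rw [if_pos h1]
        rw [hstep]
        obtain ⟨i1, i2, i3, i4⟩ := ih r hrlen hrsort (k + 1) [x]
        set R := (pvScan r (k + 1) [x]).1 with hR
        refine ⟨by omega, ?_, ?_, ?_⟩
        · intro y hy
          rcases (hmem y).mp hy with h | h
          · rw [h, hcx]; exact i1
          · have hyx : y ≠ x := fun he => hnx (he ▸ h)
            rw [hcy y hyx]; exact i2 y h
        · right
          rcases i3 with h | ⟨y, hy, hcyr⟩
          · exact ⟨x, List.mem_cons_self, by rw [hcx, h]⟩
          · have hyx : y ≠ x := fun he => hnx (he ▸ hy)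
            exact ⟨y, (hmem y).mpr (Or.inr hy), by rw [hcy y hyx]; exact hcyr⟩
        · intro y
          rw [i4 y]
          constructor
          · rintro (⟨hRe, hy⟩ | ⟨hy, hcyr⟩)
            · have hyx : y = x := by simpa using hy
              subst hyx
              exact Or.inr ⟨List.mem_cons_self, by rw [hcx, hRe]⟩
            · have hyx : y ≠ x := fun he => hnx (he ▸ hy)
              exact Or.inr ⟨(hmem y).mpr (Or.inr hy), by rw [hcy y hyx]; exact hcyr⟩
          · rintro (⟨hRe, _⟩ | ⟨hy, hcyr⟩)
            · omega
            · rcases (hmem y).mp hy with h | h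
              · subst h
                rw [hcx] at hcyr
                exact Or.inl ⟨hcyr.symm, by simp⟩
              · have hyx : y ≠ x := fun he => hnx (he ▸ h)
                rw [hcy y hyx] at hcyr
                exact Or.inr ⟨h, hcyr⟩
      · -- run ≤ b : candidates appended (run = b) or dropped (run < b)
        have hstep : pvScan (x :: t) b c
            = pvScan r b (if k + 1 = b then c ++ [x] else c) := by
          simp only [pvScan, ← hk, ← hrr]
          rw [if_neg h1]
          by_cases h2 : k + 1 = b <;> simp [h2]
        rw [hstep]
        set c2 := (if k + 1 = b then c ++ [x] else c) with hc2
        obtain ⟨i1, i2, i3, i4⟩ := ih r hrlen hrsort b c2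
        set R := (pvScan r b c2).1 with hR
        refine ⟨i1, ?_, ?_, ?_⟩
        · intro y hy
          rcases (hmem y).mp hy with h | h
          · rw [h, hcx]; omega
          · have hyx : y ≠ x := fun he => hnx (he ▸ h)
            rw [hcy y hyx]; exact i2 y h
        · rcases i3 with h | ⟨y, hy, hcyr⟩
          · exact Or.inl h
          · have hyx : y ≠ x := fun he => hnx (he ▸ hy)
            exact Or.inr ⟨y, (hmem y).mpr (Or.inr hy), by rw [hcy y hyx]; exact hcyr⟩
        · intro y
          rw [i4 y]
          constructor
          · rintro (⟨hRe, hy⟩ | ⟨hy, hcyr⟩)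
            · by_cases h2 : k + 1 = b
              · rw [hc2, if_pos h2] at hy
                rcases List.mem_append.mp hy with h | h
                · exact Or.inl ⟨hRe, h⟩
                · have hyx : y = x := by simpa using h
                  subst hyx
                  exact Or.inr ⟨List.mem_cons_self, by rw [hcx, h2, hRe]⟩
              · rw [hc2, if_neg h2] at hy
                exact Or.inl ⟨hRe, hy⟩
            · have hyx : y ≠ x := fun he => hnx (he ▸ hy)
              exact Or.inr ⟨(hmem y).mpr (Or.inr hy), by rw [hcy y hyx]; exact hcyr⟩
          · rintro (⟨hRe, hy⟩ | ⟨hy, hcyr⟩)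
            · refine Or.inl ⟨hRe, ?_⟩
              by_cases h2 : k + 1 = b <;> simp [hc2, h2, hy]
            · rcases (hmem y).mp hy with h | h
              · subst h
                rw [hcx] at hcyr
                have hknb : k + 1 ≤ b := by omega
                have hRb : R = b := by omega
                have h2 : k + 1 = b := by omega
                refine Or.inl ⟨hRb, ?_⟩
                simp [hc2, h2]
              · have hyx : y ≠ x := fun he => hnx (he ▸ h)
                rw [hcy y hyx] at hcyr
                exact Or.inr ⟨h, hcyr⟩

theorem pvFirst_eq (cands : List String) : ∀ (l : List String),
    pvFirst l cands = (l.find? (fun e => decide (e ∈ cands))).getD "." := by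
  intro l
  induction l with
  | nil => rfl
  | cons e t ih =>
    by_cases h : e ∈ cands
    · rw [List.find?_cons_of_pos (by simp [h])]
      simp [pvFirst, h]
    · rw [List.find?_cons_of_neg (by simp [h])]
      simp only [pvFirst, h, if_false]
      exact ih

-- ===== VERDICT (by name: the statement is the Claim_ definition above) =====
theorem cons_max_pos_spec : Claim_equal_cons_max_pos := by
  intro l _
  unfold Spec_cons_max_pos cons_max_pos
  rw [foldA l l ["."] 0 "."]
  rw [foldMax_char (fun kk => (PySem.List.count l kk : Int)) (pvSel ["."] l) 0 "."]
  have halt : cons_max_pos_alt l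
      = pvFirst l (pvScan (PySem.List.sorted (l.filter (fun e => decide (e ≠ "."))) (fun x => x) false) 0 []).2 := rfl
  rw [halt]
  set c : String → Int := fun kk => (PySem.List.count l kk : Int) with hc
  set D := pvSel ["."] l with hD
  set R := runMax c D 0 with hR
  set xs := PySem.List.sorted (l.filter (fun e => decide (e ≠ "."))) (fun x => x) false with hxs
  show (if R = 0 then "." else (D.find? (fun kk => decide (c kk = R))).getD ".")
      = pvFirst l (pvScan xs 0 []).2
  -- facts about the sorted filtered list
  have hperm : xs.Perm (l.filter (fun e => decide (e ≠ "."))) := by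
    rw [hxs]; exact PySem.List.sorted_perm _ _ _
  have hmemxs : ∀ y, y ∈ xs ↔ (y ∈ l ∧ y ≠ ".") := by
    intro y
    rw [hperm.mem_iff]
    simp
  have hcntxs : ∀ y, y ≠ "." → xs.count y = l.count y := by
    intro y hy
    rw [hperm.count_eq]
    exact List.count_filter (by simp [hy])
  have hmemD : ∀ y, y ∈ D ↔ (y ∈ l ∧ y ≠ ".") := by
    intro y
    rw [hD, mem_pvSel]
    simp
  have hsort : xs.Pairwise (· ≤ ·) := by
    rw [hxs]; exact PySem.List.sorted_pairwise _ _
  obtain ⟨s1, s2, s3, s4⟩ := pvScan_spec xs.length xs le_rfl hsort 0 []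
  set b0 := (pvScan xs 0 []).1 with hb0
  have hmemc : ∀ y, y ∈ (pvScan xs 0 []).2 ↔ (y ∈ xs ∧ xs.count y = b0) := by
    intro y
    rw [s4 y]
    simp
  have hcnt_eq : ∀ y, y ∈ xs → c y = (xs.count y : Int) := by
    intro y hy
    have hy' := (hmemxs y).mp hy
    rw [hc]
    simp only [PySem.List.count_eq]
    rw [hcntxs y hy'.2]
  -- the two maxima agree
  have hRb : R = (b0 : Int) := by
    have hle1 : R ≤ (b0 : Int) := by
      rcases runMax_cases c D 0 with h | ⟨kk, hkk, hck⟩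
      · rw [hR, h]; omega
      · have hkx : kk ∈ xs := (hmemxs kk).mpr ((hmemD kk).mp hkk)
        have h2 := s2 kk hkx
        rw [hR, ← hck, hcnt_eq kk hkx]
        exact_mod_cast h2
    have hle2 : (b0 : Int) ≤ R := by
      rcases s3 with h | ⟨y, hy, hcy⟩
      · rw [h, hR]
        simpa using runMax_base_le c D 0
      · have hyD : y ∈ D := (hmemD y).mpr ((hmemxs y).mp hy)
        have h4 := runMax_mem_le c D 0 y hyD
        rw [hcnt_eq y hy, hcy] at h4
        rw [hR]
        exact h4
    exact le_antisymm hle1 hle2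
  -- rewrite B through find?
  rw [pvFirst_eq]
  by_cases hz : R = 0
  · -- no non-'.' element: both sides are "."
    have hb0z : b0 = 0 := by
      rw [hz] at hRb
      omega
    have hcempty : ∀ y, y ∉ (pvScan xs 0 []).2 := by
      intro y hy
      have h := (hmemc y).mp hy
      have hp : 0 < xs.count y := List.count_pos_iff.mpr h.1
      omega
    rw [if_pos hz, List.find?_eq_none.mpr (fun y _ => by simp [hcempty y])]
    rfl
  · -- some non-'.' element: both find the earliest value of maximal multiplicity
    rw [if_neg hz, hD, find?_pvSel]
    have hcongr : l.find? (fun y => decide (y ∉ (["."] : List String)) && decide (c y = R))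
        = l.find? (fun e => decide (e ∈ (pvScan xs 0 []).2)) := by
      apply find?_pred_congr
      intro y hy
      by_cases hyd : y = "."
      · subst hyd
        have hnot : ("." : String) ∉ (pvScan xs 0 []).2 := fun h =>
          ((hmemxs ".").mp ((hmemc ".").mp h).1).2 rfl
        simp [hnot]
      · have hyx : y ∈ xs := (hmemxs y).mpr ⟨hy, hyd⟩
        have h2 : y ∈ (pvScan xs 0 []).2 ↔ xs.count y = b0 := by
          rw [hmemc y]
          simp [hyx]
        rw [hcnt_eq y hyx, hRb]
        simp [h2, hyd]
    rw [hcongr]
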